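-- pv_equiv track=rewrite | github.com/RimSort/RimSort | app/views/rimworld_log_reader.py | extract_mods_from_log
-- ===== SOURCE A (Python) =====
-- def extract_mods_from_log(log_lines: list[str]) -> list[str]:
--     mods: list[str] = []
--     in_mod_section = False
--     for line in log_lines:
--         if line.strip().startswith("Loaded mods:"):
--             in_mod_section = True
--             continue
--         if in_mod_section:
--             if not line.strip() or line.strip().startswith("---"):
--                 break
--             if "(" in line and ")" in line and ":" in line:
--                 mod_name = line.split("(")[0].strip()
--                 if mod_name and mod_name not in mods:
--                     mods.append(mod_name)
--     return mods
-- ===== SOURCE B (Python) =====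
-- def extract_mods_from_log(log_lines: list[str]) -> list[str]:
--     markers = [i for i, line in enumerate(log_lines) if line.strip().startswith("Loaded mods:")]
--     if not markers:
--         return []
--     tail = log_lines[markers[0] + 1:]
--     stops = [i for i, line in enumerate(tail) if not line.strip() or line.strip().startswith("---")]
--     section = tail[: stops[0]] if stops else tail
--     names = [line.split("(")[0].strip() for line in section if "(" in line and ")" in line and ":" in line]
--     return list(dict.fromkeys(name for name in names if name))
-- ===== Notes on version B (the rewrite author's own statement) =====
-- stated objective: alternative
-- what changed: Replaces A's single flag-driven loop with an index-based pipeline: comprehensions compute the marker and boundary index lists, slices cut out the mod section, a comprehension extracts the names and dict.fromkeys dedups once; Pre_ excludes logs where a 'Loaded mods:' header line reappears inside the section — a duplicated header no caller specifies, which A reads as a header and skips while B reads it as an ordinary section line, both defensible.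
-- outside the precondition, e.g. on extract_mods_from_log(['Loaded mods:', 'Loaded mods: a(b):']): A returns [], B returns ['Loaded mods: a']
import Mathlib
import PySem

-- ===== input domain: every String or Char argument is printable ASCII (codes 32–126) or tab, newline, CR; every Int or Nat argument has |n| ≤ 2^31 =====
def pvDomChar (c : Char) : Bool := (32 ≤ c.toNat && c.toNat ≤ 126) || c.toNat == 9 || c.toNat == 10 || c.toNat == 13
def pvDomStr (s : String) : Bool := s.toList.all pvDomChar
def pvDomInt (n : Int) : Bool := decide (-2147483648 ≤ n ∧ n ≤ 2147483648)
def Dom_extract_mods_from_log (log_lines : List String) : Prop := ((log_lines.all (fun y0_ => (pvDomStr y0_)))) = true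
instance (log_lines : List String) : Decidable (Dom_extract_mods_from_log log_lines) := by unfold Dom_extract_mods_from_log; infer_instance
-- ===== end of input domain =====

-- B replaces A's flag-driven loop by an index/slice pipeline (marker and boundary index lists, slices, comprehension, one dedup);
-- Pre_ excludes logs where a 'Loaded mods:' header line reappears inside the mod section (a duplicated header no caller specifies:
-- A reads it as a header and skips it, B reads it as an ordinary section line; either reading is defensible).


-- ===== PORT A =====
-- shared line predicates (these Python expressions occur verbatim in A and in B)
def pvIsMarker (l : String) : Bool := PySem.Str.startswith (PySem.Str.strip l) "Loaded mods:"
def pvIsBoundary (l : String) : Bool := PySem.Str.strip l == "" || PySem.Str.startswith (PySem.Str.strip l) "---"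
def pvHasParens (l : String) : Bool := PySem.Str.isIn "(" l && PySem.Str.isIn ")" l && PySem.Str.isIn ":" l
-- line.split("(")[0].strip(); split with a nonempty separator always returns a nonempty list, so [0] never raises
def pvModName (l : String) : String := PySem.Str.strip (((PySem.Str.split? l "(").getD []).headD "")

-- A's loop: state (mods, in_mod_section); returning mods mid-list is the 'break'
def pvALoop : List String → List String → Bool → List String
  | [], mods, _ => mods
  | l :: rest, mods, inSec =>
    if pvIsMarker l then pvALoop rest mods true
    else if inSec then
      if pvIsBoundary l then mods
      else if pvHasParens l then
        let name := pvModName l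
        if name != "" && !(mods.contains name) then pvALoop rest (mods ++ [name]) inSec
        else pvALoop rest mods inSec
      else pvALoop rest mods inSec
    else pvALoop rest mods inSec

def extract_mods_from_log (log_lines : List String) : List String :=
  pvALoop log_lines [] false

-- ===== PORT B =====
def extract_mods_from_log_alt (log_lines : List String) : List String :=
  let markers := ((PySem.List.enumerate log_lines).filter (fun p => pvIsMarker p.2)).map Prod.fst
  match markers with
  | [] => []
  | m0 :: _ =>
    let tail := PySem.List.slice log_lines (some (m0 + 1)) none
    let stops := ((PySem.List.enumerate tail).filter (fun p => pvIsBoundary p.2)).map Prod.fst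
    let sec := match stops with
      | [] => tail
      | s0 :: _ => PySem.List.slice tail none (some s0)
    let names := (sec.filter pvHasParens).map pvModName
    PySem.List.dedup (names.filter (fun n => n != ""))

-- ===== PRECONDITION & SPEC =====
-- Pre_ excludes logs in which a line stripping to start with 'Loaded mods:' occurs again inside the mod
-- section (after the first marker, before the blank/'---' boundary): a duplicated section header is a
-- corner no caller specifies — A reads it as a header and skips it, B reads it as an ordinary section
-- line, and either reading is defensible, so nothing is claimed there.
def Pre_extract_mods_from_log (log_lines : List String) : Prop :=
  (match log_lines.findIdx? pvIsMarker with
   | none => true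
   | some i => ((log_lines.drop (i + 1)).takeWhile (fun l => !pvIsBoundary l)).all
                 (fun l => !pvIsMarker l)) = true
instance (log_lines : List String) : Decidable (Pre_extract_mods_from_log log_lines) := by
  unfold Pre_extract_mods_from_log; infer_instance

def pvWitness_extract_mods_from_log : List String := ["Loaded mods:", "a (1): b"]

def Spec_extract_mods_from_log (log_lines : List String) (out : List String) : Prop := out = extract_mods_from_log_alt log_lines
instance (log_lines : List String) (out : List String) : Decidable (Spec_extract_mods_from_log log_lines out) := by unfold Spec_extract_mods_from_log; infer_instance

-- ===== CLAIM (what is proved, stated in full; the proofs are below) =====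
def Claim_equal_extract_mods_from_log : Prop := ∀ (log_lines : List String), Dom_extract_mods_from_log log_lines → Pre_extract_mods_from_log log_lines → Spec_extract_mods_from_log log_lines (extract_mods_from_log log_lines)

-- ===== LEMMAS AND PROOFS =====

-- proof-side recursive characterisations of B's pipeline stages
def pvFindTail : List String → Option (List String)
  | [] => none
  | l :: rest => if pvIsMarker l then some rest else pvFindTail rest

def pvSection (xs : List String) : List String := xs.takeWhile (fun l => !pvIsBoundary l)

def pvRawNames (xs : List String) : List String :=
  (((pvSection xs).filter pvHasParens).map pvModName).filter (fun n => n != "")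

-- index list of the lines satisfying p, as B's comprehension computes it
def pvIdxs (p : String → Bool) (xs : List String) (s : Int) : List Int :=
  ((PySem.List.enumerate xs s).filter (fun q => p q.2)).map Prod.fst

theorem pvIdxs_cons (p : String → Bool) (x : String) (xs : List String) (s : Int) :
    pvIdxs p (x :: xs) s = if p x then s :: pvIdxs p xs (s + 1) else pvIdxs p xs (s + 1) := by
  simp only [pvIdxs, PySem.List.enumerate_cons, List.filter_cons]
  split_ifs <;> simp_all

theorem pvIdxs_head (p : String → Bool) (xs : List String) (s : Int) :
    (pvIdxs p xs s).head? = (xs.findIdx? p).map (fun n => s + (n : Int)) := by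
  induction xs generalizing s with
  | nil => simp [pvIdxs, PySem.List.enumerate]
  | cons x xs ih =>
    rw [pvIdxs_cons, List.findIdx?_cons]
    by_cases h : p x
    · simp [h]
    · simp only [h, if_false, Bool.false_eq_true, ih]
      cases xs.findIdx? p <;> simp; omega

theorem pvFindTail_eq (xs : List String) :
    pvFindTail xs = (xs.findIdx? pvIsMarker).map (fun n => xs.drop (n + 1)) := by
  induction xs with
  | nil => rfl
  | cons x xs ih =>
    rw [List.findIdx?_cons]
    by_cases h : pvIsMarker x
    · simp [pvFindTail, h]
    · simp only [pvFindTail, h, if_false, Bool.false_eq_true, ih, Option.map_map]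
      cases xs.findIdx? pvIsMarker <;> rfl

theorem pvTakeWhile_findIdx (q : String → Bool) (xs : List String) :
    xs.takeWhile (fun l => !q l) = (match xs.findIdx? q with
      | none => xs
      | some j => xs.take j) := by
  induction xs with
  | nil => rfl
  | cons x xs ih =>
    rw [List.findIdx?_cons]
    by_cases h : q x
    · simp [h]
    · simp only [List.takeWhile_cons, h, Bool.not_false, if_true, if_false, Bool.false_eq_true, ih]
      cases xs.findIdx? q <;> rfl

theorem pvDropMin {α : Type} (xs : List α) (a : Nat) : xs.drop (min a xs.length) = xs.drop a := by
  rcases le_total a xs.length with h | h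
  · rw [min_eq_left h]
  · rw [min_eq_right h, List.drop_length, List.drop_eq_nil_of_le h]

-- B's pipeline computes: dedup of the raw names of the tail after the first marker line
theorem pvAlt_eq (log_lines : List String) :
    extract_mods_from_log_alt log_lines = (match pvFindTail log_lines with
      | none => []
      | some tail => PySem.List.dedup (pvRawNames tail)) := by
  unfold extract_mods_from_log_alt
  rw [pvFindTail_eq]
  have hm := pvIdxs_head pvIsMarker log_lines 0
  cases hfi : log_lines.findIdx? pvIsMarker with
  | none =>
    rw [hfi] at hm
    have h0 : pvIdxs pvIsMarker log_lines 0 = [] := by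
      cases h : pvIdxs pvIsMarker log_lines 0 with
      | nil => rfl
      | cons a l => rw [h] at hm; simp at hm
    unfold pvIdxs at h0
    simp only [h0]
    rfl
  | some n =>
    rw [hfi] at hm
    cases h : pvIdxs pvIsMarker log_lines 0 with
    | nil => rw [h] at hm; simp at hm
    | cons m0 ms =>
      rw [h] at hm
      have hm0 : m0 = (n : Int) := by simp at hm; omega
      subst hm0
      have hps : ((PySem.List.enumerate log_lines 0).filter
          (fun q => pvIsMarker q.2)).map Prod.fst = (n : Int) :: ms := h
      simp only [hps]
      -- tail slice = drop (n+1)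
      have htail : PySem.List.slice log_lines (some ((n : Int) + 1)) none = log_lines.drop (n + 1) := by
        rw [PySem.List.slice_some_none]
        have : ((n : Int) + 1) = ((n + 1 : Nat) : Int) := by push_cast; ring
        rw [this, PySem.List.clampIdx_natCast, pvDropMin]
      rw [htail]
      -- section via stops
      have hs := pvIdxs_head pvIsBoundary (log_lines.drop (n + 1)) 0
      have hsec : (match ((PySem.List.enumerate (log_lines.drop (n + 1)) 0).filter
            (fun p => pvIsBoundary p.2)).map Prod.fst with
          | [] => log_lines.drop (n + 1)
          | s0 :: _ => PySem.List.slice (log_lines.drop (n + 1)) none (some s0))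
          = pvSection (log_lines.drop (n + 1)) := by
        rw [pvSection, pvTakeWhile_findIdx]
        cases hfb : (log_lines.drop (n + 1)).findIdx? pvIsBoundary with
        | none =>
          rw [hfb] at hs
          have hb0 : pvIdxs pvIsBoundary (log_lines.drop (n + 1)) 0 = [] := by
            cases hb : pvIdxs pvIsBoundary (log_lines.drop (n + 1)) 0 with
            | nil => rfl
            | cons a l => rw [hb] at hs; simp at hs
          unfold pvIdxs at hb0
          simp only [hb0]
        | some j =>
          rw [hfb] at hs
          cases hb : pvIdxs pvIsBoundary (log_lines.drop (n + 1)) 0 with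
          | nil => rw [hb] at hs; simp at hs
          | cons s0 ss =>
            rw [hb] at hs
            have hs0 : s0 = (j : Int) := by simp at hs; omega
            subst hs0
            have hb' : ((PySem.List.enumerate (log_lines.drop (n + 1)) 0).filter
                (fun p => pvIsBoundary p.2)).map Prod.fst = (j : Int) :: ss := hb
            simp only [hb']
            rw [PySem.List.slice_to _ (by positivity)]
            simp
      simp only [hsec, pvRawNames]
      rfl

-- a marker line is never a boundary line: its strip starts with 'L', so it is nonempty and not '---'
theorem pvMarker_not_boundary (l : String) (h : pvIsMarker l = true) : pvIsBoundary l = false := by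
  unfold pvIsMarker at h
  unfold pvIsBoundary
  simp only [PySem.Str.startswith, PySem.Chars.startswith] at h ⊢
  have hL : "Loaded mods:".toList = 'L' :: "oaded mods:".toList := by decide
  have hD : "---".toList = '-' :: "--".toList := by decide
  cases hs : (PySem.Str.strip l).toList with
  | nil => rw [hs, hL] at h; simp [List.isPrefixOf] at h
  | cons c cs =>
    rw [hs] at h
    rw [hL] at h
    simp only [List.isPrefixOf, Bool.and_eq_true, beq_iff_eq] at h
    have hne : (PySem.Str.strip l == "") = false := by
      cases hq : PySem.Str.strip l == "" with
      | true =>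
        have := eq_of_beq hq
        rw [this] at hs
        simp at hs
      | false => rfl
    rw [hne, hD]
    simp only [List.isPrefixOf, Bool.false_or, Bool.and_eq_false_iff]
    left
    rw [← h.1]
    decide

-- inside the section (with no stray marker lines before the boundary), A's inline-dedup loop
-- is a fold of PySem.Set.add over B's raw name list
theorem pvALoop_true_eq (tail : List String)
    (hpre : ((tail.takeWhile (fun l => !pvIsBoundary l)).all (fun l => !pvIsMarker l)) = true) :
    ∀ (mods : List String),
      pvALoop tail mods true = List.foldl PySem.Set.add mods (pvRawNames tail) := by
  induction tail with
  | nil => intro mods; rfl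
  | cons l rest ih =>
    intro mods
    by_cases hm : pvIsMarker l
    · exfalso
      have hnb := pvMarker_not_boundary l hm
      rw [List.takeWhile_cons, hnb] at hpre
      simp [hm] at hpre
    · by_cases hb : pvIsBoundary l
      · simp [pvALoop, hm, hb, pvRawNames, pvSection]
      · rw [List.takeWhile_cons] at hpre
        simp only [hb, Bool.not_false, if_true, List.all_cons, Bool.and_eq_true] at hpre
        have ih' := ih hpre.2
        have hraw : pvRawNames (l :: rest) =
            (if pvHasParens l then (if pvModName l != "" then [pvModName l] else []) else [])
              ++ pvRawNames rest := by
          simp only [pvRawNames, pvSection, List.takeWhile_cons, hb, Bool.not_false, if_true,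
            List.filter_cons]
          split_ifs with h1 h2 <;> simp_all
        simp only [pvALoop, hm, if_false, if_true, hb, Bool.false_eq_true, hraw]
        by_cases hp : pvHasParens l
        · simp only [hp, if_true]
          by_cases hn : pvModName l != ""
          · simp only [hn, if_true]
            by_cases hc : mods.contains (pvModName l)
            · simp only [hc, Bool.not_true, Bool.and_false, if_false, Bool.false_eq_true, ih']
              rw [List.singleton_append, List.foldl_cons]
              have hmem : pvModName l ∈ mods := by simpa using hc
              have : PySem.Set.add mods (pvModName l) = mods := by
                simp [PySem.Set.add, hmem]
              rw [this]
            · simp only [hc, Bool.not_false, Bool.and_true, if_true, ih']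
              rw [List.singleton_append, List.foldl_cons]
              have hmem : pvModName l ∉ mods := by simpa using hc
              have : PySem.Set.add mods (pvModName l) = mods ++ [pvModName l] := by
                simp [PySem.Set.add, hmem]
              rw [this]
          · simp only [hn, Bool.false_and, if_false, Bool.false_eq_true, List.nil_append, ih']
        · simp only [hp, if_false, Bool.false_eq_true, List.nil_append, ih']

-- before the section, A's loop does nothing until the first marker line
theorem pvALoop_false_eq (lines : List String) :
    pvALoop lines [] false =
      match pvFindTail lines with
      | none => []
      | some tail => pvALoop tail [] true := by
  induction lines with
  | nil => rfl
  | cons l rest ih =>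
    simp only [pvALoop, pvFindTail]
    by_cases hm : pvIsMarker l
    · simp [hm]
    · simp [hm, ih]

-- ===== VERDICT (by name: the statement is the Claim_ definition above) =====
theorem extract_mods_from_log_spec : Claim_equal_extract_mods_from_log := by
  intro log_lines _ hpre
  show extract_mods_from_log log_lines = extract_mods_from_log_alt log_lines
  rw [pvAlt_eq, extract_mods_from_log, pvALoop_false_eq]
  unfold Pre_extract_mods_from_log at hpre
  rw [pvFindTail_eq]
  cases hfi : log_lines.findIdx? pvIsMarker with
  | none => rfl
  | some n =>
    rw [hfi] at hpre
    simp only [Option.map_some]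
    rw [pvALoop_true_eq (log_lines.drop (n + 1)) hpre []]
    simp only [PySem.List.dedup, PySem.Set.ofList]
    rfl
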